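-- pv_equiv track=rewrite | github.com/IFero04/Scraper-DGES | main.py | extract_substring
-- ===== SOURCE A (Python) =====
-- def extract_substring(text):
--     have_text = False
--     result = ''
--     for char in text:
--         if char.isdigit() and have_text:
--             break
--         if char.isalpha():
--             have_text = True
--         result += char
--     return result.strip()
-- ===== SOURCE B (Python) =====
-- def extract_substring(text):
--     first = next((i for i, c in enumerate(text) if c.isalpha()), None)
--     if first is None:
--         return text.strip()
--     cut = next((j for j, c in enumerate(text[first + 1:], first + 1) if c.isdigit()),
--                len(text))
--     return text[:cut].strip()
-- ===== Notes on version B (the rewrite author's own statement) =====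
-- stated objective: alternative
-- what changed: B replaces A's stateful accumulate-and-break loop with two index searches (first alphabetic char, then first digit after it) followed by a single slice-and-strip.
import Mathlib
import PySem

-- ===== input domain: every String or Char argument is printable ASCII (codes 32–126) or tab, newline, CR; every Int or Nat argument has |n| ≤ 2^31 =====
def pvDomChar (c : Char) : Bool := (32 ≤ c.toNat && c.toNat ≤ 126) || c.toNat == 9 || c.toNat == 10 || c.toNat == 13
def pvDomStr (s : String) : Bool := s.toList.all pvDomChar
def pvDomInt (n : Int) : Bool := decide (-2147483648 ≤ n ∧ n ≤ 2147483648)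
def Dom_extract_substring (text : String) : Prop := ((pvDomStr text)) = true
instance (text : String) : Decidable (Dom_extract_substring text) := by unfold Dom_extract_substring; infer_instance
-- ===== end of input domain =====

-- B computes the cut boundary with two index searches instead of A's stateful accumulate-and-break loop (objective: alternative decomposition).

-- ===== PORT A =====
-- the for-loop with its break, state (have_text, result)
def pvLoopA : List Char → Bool → List Char → List Char
  | [], _, result => result
  | c :: rest, have_text, result =>
    if PySem.Chars.isdigit c && have_text then result
    else pvLoopA rest (if PySem.Chars.isalpha c then true else have_text) (result ++ [c])

def extract_substring (text : String) : String :=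
  String.ofList (PySem.Chars.strip (pvLoopA text.toList false []))

-- ===== PORT B =====
def extract_substring_alt (text : String) : String :=
  let cs := text.toList
  match cs.findIdx? (fun c => PySem.Chars.isalpha c) with
  | none => String.ofList (PySem.Chars.strip cs)
  | some first =>
    let cut : Nat :=
      match (cs.drop (first + 1)).findIdx? (fun c => PySem.Chars.isdigit c) with
      | none => cs.length
      | some j => first + 1 + j
    String.ofList (PySem.Chars.strip (cs.take cut))

-- ===== PRECONDITION & SPEC =====
def Spec_extract_substring (text : String) (out : String) : Prop := out = extract_substring_alt text
instance (text : String) (out : String) : Decidable (Spec_extract_substring text out) := by unfold Spec_extract_substring; infer_instance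

-- ===== CLAIM (what is proved, stated in full; the proofs are below) =====
def Claim_equal_extract_substring : Prop := ∀ (text : String), Dom_extract_substring text → Spec_extract_substring text (extract_substring text)

-- ===== LEMMAS AND PROOFS =====

theorem pvLoopA_acc (cs : List Char) : ∀ (b : Bool) (acc : List Char),
    pvLoopA cs b acc = acc ++ pvLoopA cs b [] := by
  induction cs with
  | nil => intro b acc; simp [pvLoopA]
  | cons c r ih =>
    intro b acc
    simp only [pvLoopA]
    split
    · simp
    · rw [ih _ (acc ++ [c]), ih _ ([] ++ [c])]
      simp

theorem pvLoopA_true (cs : List Char) :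
    pvLoopA cs true [] = cs.takeWhile (fun c => !PySem.Chars.isdigit c) := by
  induction cs with
  | nil => simp [pvLoopA]
  | cons c r ih =>
    by_cases h : PySem.Chars.isdigit c = true
    · simp [pvLoopA, h]
    · have h' : PySem.Chars.isdigit c = false := by simpa using h
      simp only [pvLoopA, h', Bool.false_and, Bool.false_eq_true, if_false, List.nil_append]
      rw [ite_self, pvLoopA_acc, ih]
      simp [h']

theorem takeWhile_eq_take_findIdx? (r : List Char) :
    r.takeWhile (fun c => !PySem.Chars.isdigit c)
      = r.take ((r.findIdx? (fun c => PySem.Chars.isdigit c)).getD r.length) := by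
  induction r with
  | nil => simp
  | cons c t ih =>
    by_cases h : PySem.Chars.isdigit c = true
    · simp [h, List.findIdx?_cons]
    · have h' : PySem.Chars.isdigit c = false := by simpa using h
      simp only [List.takeWhile_cons, h', Bool.not_false, if_pos, List.findIdx?_cons]
      rw [ih]
      cases hf : t.findIdx? (fun c => PySem.Chars.isdigit c) <;> simp

-- core equality of the two algorithms on the character list
theorem core_eq (cs : List Char) :
    pvLoopA cs false []
      = (match cs.findIdx? (fun c => PySem.Chars.isalpha c) with
         | none => cs
         | some first =>
           cs.take (match (cs.drop (first + 1)).findIdx? (fun c => PySem.Chars.isdigit c) with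
                    | none => cs.length
                    | some j => first + 1 + j)) := by
  induction cs with
  | nil => simp [pvLoopA]
  | cons c r ih =>
    have step : pvLoopA (c :: r) false []
        = c :: pvLoopA r (if PySem.Chars.isalpha c then true else false) [] := by
      simp only [pvLoopA, Bool.and_false, Bool.false_eq_true, if_false, List.nil_append]
      rw [pvLoopA_acc]
      simp
    by_cases ha : PySem.Chars.isalpha c = true
    · rw [step, if_pos ha, pvLoopA_true, takeWhile_eq_take_findIdx?]
      have hR : (c :: r).findIdx? (fun c => PySem.Chars.isalpha c) = some 0 := by
        simp [List.findIdx?_cons, ha]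
      rw [hR]
      simp only [List.drop_succ_cons, List.drop_zero, List.length_cons]
      cases hfd : r.findIdx? (fun c => PySem.Chars.isdigit c) with
      | none => simp
      | some v =>
        have h1 : 0 + 1 + v = v + 1 := by omega
        simp [h1, List.take_succ_cons]
    · have ha' : PySem.Chars.isalpha c = false := by simpa using ha
      rw [step, if_neg (by simp [ha']), ih]
      have hR : (c :: r).findIdx? (fun c => PySem.Chars.isalpha c)
          = Option.map (· + 1) (r.findIdx? (fun c => PySem.Chars.isalpha c)) := by
        simp [List.findIdx?_cons, ha']
      rw [hR]
      cases hfa : r.findIdx? (fun c => PySem.Chars.isalpha c) with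
      | none => simp
      | some f =>
        simp only [Option.map_some, List.drop_succ_cons, List.length_cons]
        cases hfd : (r.drop (f + 1)).findIdx? (fun c => PySem.Chars.isdigit c) with
        | none => simp [List.take_succ_cons]
        | some j =>
          have h2 : f + 1 + 1 + j = (f + 1 + j) + 1 := by omega
          simp [h2, List.take_succ_cons]

-- ===== VERDICT (by name: the statement is the Claim_ definition above) =====
theorem extract_substring_spec : Claim_equal_extract_substring := by
  intro text _
  unfold Spec_extract_substring extract_substring extract_substring_alt
  rw [core_eq]
  cases hfa : text.toList.findIdx? (fun c => PySem.Chars.isalpha c) <;> simp [hfa]
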